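-- pv_equiv track=rewrite | github.com/WhalepigJun/CodingTest | 202107/20210730_E_P_2798_블랙잭.py | blackjack
-- ===== SOURCE A (Python) =====
-- def blackjack(n,m,cards):
--     max=0
--     for i in range(0,n-2):
--         for j in range(i+1,n-1):
--             for k in range(j+1,n):
--                 tmp_sum=cards[i]+cards[j]+cards[k]
--                 if tmp_sum>m:
--                     continue
--                 if tmp_sum>max:
--                     max=tmp_sum
--     return max
-- ===== SOURCE B (Python) =====
-- def blackjack(n, m, cards):
--     # Sort the first n cards, then fix the smallest card of the triple and
--     # find the best remaining pair with two pointers: O(n^2) instead of O(n^3).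
--     xs = sorted(cards[:n]) if n > 0 else []
--     best = 0
--     for i in range(len(xs) - 2):
--         x = xs[i]
--         l, r = i + 1, len(xs) - 1
--         while l < r:
--             s = x + xs[l] + xs[r]
--             if s <= m:
--                 if s > best:
--                     best = s
--                 l += 1
--             else:
--                 r -= 1
--     return best
-- ===== Notes on version B (the rewrite author's own statement) =====
-- stated objective: faster
-- what changed: Replaces the brute-force triple nested index loop with sort-then-fix-one-card plus a two-pointer scan for the best pair, dropping the cubic enumeration.
import Mathlib
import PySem

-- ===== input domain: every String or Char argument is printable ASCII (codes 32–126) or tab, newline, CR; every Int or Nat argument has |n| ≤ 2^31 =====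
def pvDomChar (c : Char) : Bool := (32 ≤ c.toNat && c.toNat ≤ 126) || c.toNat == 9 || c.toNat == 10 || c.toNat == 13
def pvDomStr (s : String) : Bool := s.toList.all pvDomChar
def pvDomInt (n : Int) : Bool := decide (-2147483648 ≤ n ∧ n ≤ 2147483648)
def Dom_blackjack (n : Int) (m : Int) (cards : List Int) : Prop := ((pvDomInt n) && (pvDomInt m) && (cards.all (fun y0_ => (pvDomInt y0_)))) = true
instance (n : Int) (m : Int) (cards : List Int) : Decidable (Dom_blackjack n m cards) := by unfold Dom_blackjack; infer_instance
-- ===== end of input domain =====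

-- B replaces A's cubic triple loop by sort + fix-one-card + two-pointer best pair (O(n^2)); equal return value on Pre_.

-- ===== PORT A =====
def blackjack (n : Int) (m : Int) (cards : List Int) : Int :=
  (PySem.List.pyRange 0 (n - 2) 1).foldl (fun mx i =>
    (PySem.List.pyRange (i + 1) (n - 1) 1).foldl (fun mx j =>
      (PySem.List.pyRange (j + 1) n 1).foldl (fun mx k =>
        let tmp_sum := PySem.List.pyGetD cards i 0 + PySem.List.pyGetD cards j 0 +
          PySem.List.pyGetD cards k 0
        if tmp_sum > m then mx else if tmp_sum > mx then tmp_sum else mx) mx) mx) 0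

-- ===== PORT B =====
-- xs = sorted(cards[:n]) if n > 0 else []
def pvSortedPrefix (n : Int) (cards : List Int) : List Int :=
  if n > 0 then PySem.List.sorted (PySem.List.slice cards none (some n)) (fun v => v) false
  else []

-- the inner 'while l < r' two-pointer loop; best is the running maximum
def twoPtr (m : Int) (ys : List Int) (x : Int) (l r best : Int) : Int :=
  if l < r then
    let s := x + PySem.List.pyGetD ys l 0 + PySem.List.pyGetD ys r 0
    if s ≤ m then twoPtr m ys x (l + 1) r (if s > best then s else best)
    else twoPtr m ys x l (r - 1) best
  else best
termination_by (r - l).toNat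
decreasing_by all_goals omega

def blackjack_alt (n : Int) (m : Int) (cards : List Int) : Int :=
  (PySem.List.pyRange 0 (((pvSortedPrefix n cards).length : Int) - 2) 1).foldl
    (fun best i =>
      twoPtr m (pvSortedPrefix n cards) (PySem.List.pyGetD (pvSortedPrefix n cards) i 0)
        (i + 1) (((pvSortedPrefix n cards).length : Int) - 1) best) 0

-- ===== PRECONDITION & SPEC =====
-- A raises IndexError exactly when n ≥ 3 and cards has fewer than n elements; Pre_ excludes exactly those.
def Pre_blackjack (n : Int) (m : Int) (cards : List Int) : Prop :=
  n ≤ (cards.length : Int) ∨ n < 3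
instance (n : Int) (m : Int) (cards : List Int) : Decidable (Pre_blackjack n m cards) := by
  unfold Pre_blackjack; infer_instance
def pvWitness_blackjack : Int × Int × List Int := (3, 21, [5, 6, 7])

def Spec_blackjack (n : Int) (m : Int) (cards : List Int) (out : Int) : Prop := out = blackjack_alt n m cards
instance (n : Int) (m : Int) (cards : List Int) (out : Int) : Decidable (Spec_blackjack n m cards out) := by unfold Spec_blackjack; infer_instance

-- ===== CLAIM (what is proved, stated in full; the proofs are below) =====
def Claim_equal_blackjack : Prop := ∀ (n : Int) (m : Int) (cards : List Int), Dom_blackjack n m cards → Pre_blackjack n m cards → Spec_blackjack n m cards (blackjack n m cards)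


-- ===== LEMMAS AND PROOFS =====

-- "v is what the running-max loop produces": at least b; either still b or a candidate ≤ m;
-- and at least every candidate that is ≤ m.
def isB (m : Int) (S : Int → Prop) (b v : Int) : Prop :=
  b ≤ v ∧ (v = b ∨ (S v ∧ v ≤ m)) ∧ ∀ s, S s → s ≤ m → s ≤ v

lemma isB_unique {m : Int} {S : Int → Prop} {v1 v2 : Int}
    (h1 : isB m S 0 v1) (h2 : isB m S 0 v2) : v1 = v2 := by
  obtain ⟨le1, eq1, max1⟩ := h1
  obtain ⟨le2, eq2, max2⟩ := h2
  rcases eq1 with rfl | ⟨hS1, hm1⟩ <;> rcases eq2 with rfl | ⟨hS2, hm2⟩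
  · rfl
  · have := max1 _ hS2 hm2; omega
  · have := max2 _ hS1 hm1; omega
  · have := max1 _ hS2 hm2; have := max2 _ hS1 hm1; omega

lemma isB_iff {m : Int} {S S' : Int → Prop} {b v : Int}
    (h : ∀ s, S s ↔ S' s) (hB : isB m S b v) : isB m S' b v := by
  have : S = S' := funext fun s => propext (h s)
  rwa [this] at hB

-- A's update 'if tmp > m: continue; if tmp > mx: mx = tmp' is a single isB step.
lemma isB_step (m b c : Int) :
    isB m (fun s => s = c) b (if c > m then b else if c > b then c else b) := by
  unfold isB
  split_ifs with h1 h2 <;>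
    refine ⟨by omega, ?_, by rintro s rfl hm; omega⟩
  · exact Or.inl rfl
  · exact Or.inr ⟨rfl, by omega⟩
  · exact Or.inl rfl

-- a fold whose body is an isB step for candidate set (S i) is an isB step for the union
lemma isB_fold {m : Int} (js : List Int) (S : Int → Int → Prop) (body : Int → Int → Int)
    (h : ∀ i ∈ js, ∀ b, isB m (S i) b (body b i)) (b : Int) :
    isB m (fun s => ∃ i ∈ js, S i s) b (js.foldl body b) := by
  induction js generalizing b with
  | nil =>
    exact ⟨le_refl b, Or.inl rfl, by rintro s ⟨i, hi, _⟩ _; simp at hi⟩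
  | cons i t ih =>
    rw [List.foldl_cons]
    obtain ⟨le1, eq1, max1⟩ := h i (by simp) b
    obtain ⟨le2, eq2, max2⟩ := ih (fun i' hi' b' => h i' (by simp [hi']) b') (body b i)
    refine ⟨le_trans le1 le2, ?_, ?_⟩
    · rcases eq2 with h' | ⟨⟨i', hi', hS⟩, hm⟩
      · rw [h']
        rcases eq1 with h'' | ⟨hS, hm⟩
        · exact Or.inl h''
        · exact Or.inr ⟨⟨i, by simp, hS⟩, hm⟩
      · exact Or.inr ⟨⟨i', by simp [hi'], hS⟩, hm⟩
    · rintro s ⟨i', hi', hS⟩ hm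
      rcases List.mem_cons.mp hi' with rfl | hi'
      · exact le_trans (max1 s hS hm) le2
      · exact max2 s ⟨i', hi', hS⟩ hm

-- ----- common candidate set: sums over 3-element sublists -----
def tripSum (zs : List Int) (s : Int) : Prop :=
  ∃ a b c : Int, List.Sublist [a, b, c] zs ∧ s = a + b + c

lemma tripSum_mono {zs ws : List Int} (h : zs.Perm ws) {s : Int}
    (hz : tripSum zs s) : tripSum ws s := by
  obtain ⟨a, b, c, hsub, rfl⟩ := hz
  obtain ⟨l, hperm, hsub'⟩ := (List.Perm.subperm_left h).mp (List.Sublist.subperm hsub)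
  have hlen : l.length = 3 := by simpa using hperm.length_eq
  rcases l with _ | ⟨p, _ | ⟨q, _ | ⟨r, _ | _⟩⟩⟩ <;> simp at hlen
  have hsum := hperm.sum_eq
  simp only [List.sum_cons, List.sum_nil] at hsum
  exact ⟨p, q, r, hsub', by omega⟩

lemma tripSum_perm {zs ws : List Int} (h : zs.Perm ws) (s : Int) :
    tripSum zs s ↔ tripSum ws s :=
  ⟨tripSum_mono h, tripSum_mono h.symm⟩

lemma tripSum_iff_idx (zs : List Int) (s : Int) :
    tripSum zs s ↔ ∃ i j k : Nat, i < j ∧ j < k ∧ k < zs.length ∧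
      s = zs.getD i 0 + zs.getD j 0 + zs.getD k 0 := by
  constructor
  · rintro ⟨a, b, c, hsub, rfl⟩
    obtain ⟨is, heq, hpw⟩ := List.sublist_eq_map_getElem hsub
    have hlen : is.length = 3 := by
      have := congrArg List.length heq; simpa using this.symm
    rcases is with _ | ⟨p, _ | ⟨q, _ | ⟨r, _ | _⟩⟩⟩ <;> simp at hlen
    simp only [List.map_cons, List.map_nil, List.cons.injEq, and_true] at heq
    obtain ⟨rfl, rfl, rfl⟩ := heq
    simp only [List.pairwise_cons, List.mem_cons] at hpw
    refine ⟨p, q, r, ?_, ?_, r.isLt, ?_⟩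
    · exact hpw.1 q (Or.inl rfl)
    · exact hpw.2.1 r (Or.inl rfl)
    · rw [List.getD_eq_getElem zs 0 p.isLt, List.getD_eq_getElem zs 0 q.isLt,
        List.getD_eq_getElem zs 0 r.isLt]
      rfl
  · rintro ⟨i, j, k, hij, hjk, hk, rfl⟩
    have hi : i < zs.length := by omega
    have hj : j < zs.length := by omega
    have hsub := List.map_getElem_sublist (l := zs)
      (is := [⟨i, hi⟩, ⟨j, hj⟩, ⟨k, hk⟩])
      (by simp [List.pairwise_cons, Fin.mk_lt_mk]; omega)
    refine ⟨zs[i], zs[j], zs[k], by simpa using hsub, ?_⟩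
    rw [List.getD_eq_getElem zs 0 hi, List.getD_eq_getElem zs 0 hj,
      List.getD_eq_getElem zs 0 hk]

-- ----- A side -----
lemma A_isB (n m : Int) (cards : List Int) :
    isB m (fun s => ∃ i j k : Int, 0 ≤ i ∧ i < j ∧ j < k ∧ k < n ∧
        s = PySem.List.pyGetD cards i 0 + PySem.List.pyGetD cards j 0 +
          PySem.List.pyGetD cards k 0)
      0 (blackjack n m cards) := by
  unfold blackjack
  have h := isB_fold (m := m) (PySem.List.pyRange 0 (n - 2) 1)
    (fun i s => ∃ j ∈ PySem.List.pyRange (i + 1) (n - 1) 1,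
      ∃ k ∈ PySem.List.pyRange (j + 1) n 1,
        s = PySem.List.pyGetD cards i 0 + PySem.List.pyGetD cards j 0 +
          PySem.List.pyGetD cards k 0) _
    (fun i _ b =>
      isB_fold (PySem.List.pyRange (i + 1) (n - 1) 1) _ _
        (fun j _ b' =>
          isB_fold (PySem.List.pyRange (j + 1) n 1) _ _
            (fun k _ b'' => isB_step m b'' _) b') b) 0
  refine isB_iff (fun s => ?_) h
  simp only [PySem.List.mem_pyRange_one]
  constructor
  · rintro ⟨i, hi, j, hj, k, hk, rfl⟩
    exact ⟨i, j, k, by omega, by omega, by omega, by omega, rfl⟩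
  · rintro ⟨i, j, k, h0, h1, h2, h3, rfl⟩
    exact ⟨i, by omega, j, by omega, k, by omega, rfl⟩

-- ----- B side -----
lemma twoPtr_isB (m : Int) (ys : List Int) (x : Int)
    (hmono : ∀ p q : Nat, ∀ hq : q < ys.length, p ≤ q → ys.getD p 0 ≤ ys.getD q 0) :
    ∀ (l r best : Int), 0 ≤ l → r < (ys.length : Int) →
      isB m (fun s => ∃ a b : Int, l ≤ a ∧ a < b ∧ b ≤ r ∧
          s = x + PySem.List.pyGetD ys a 0 + PySem.List.pyGetD ys b 0)
        best (twoPtr m ys x l r best) := by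
  have key : ∀ (fuel : Nat) (l r best : Int), (r - l).toNat ≤ fuel → 0 ≤ l →
      r < (ys.length : Int) →
      isB m (fun s => ∃ a b : Int, l ≤ a ∧ a < b ∧ b ≤ r ∧
          s = x + PySem.List.pyGetD ys a 0 + PySem.List.pyGetD ys b 0)
        best (twoPtr m ys x l r best) := by
    intro fuel
    induction fuel with
    | zero =>
      intro l r best hfuel hl hr
      rw [twoPtr, if_neg (by omega)]
      exact ⟨le_refl _, Or.inl rfl, by rintro s ⟨a, b, h1, h2, h3, _⟩ _; omega⟩
    | succ f ih =>
      intro l r best hfuel hl hr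
      rw [twoPtr]
      by_cases hlr : l < r
      · rw [if_pos hlr]
        have hgl : PySem.List.pyGetD ys l 0 = ys.getD l.toNat 0 := by
          rw [PySem.List.pyGetD_eq_getElem ys 0 hl (by omega),
            List.getD_eq_getElem ys 0 (by omega)]
        have hgr : PySem.List.pyGetD ys r 0 = ys.getD r.toNat 0 := by
          rw [PySem.List.pyGetD_eq_getElem ys 0 (by omega) hr,
            List.getD_eq_getElem ys 0 (by omega)]
        by_cases hsm : x + PySem.List.pyGetD ys l 0 + PySem.List.pyGetD ys r 0 ≤ m
        · rw [if_pos hsm]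
          obtain ⟨le2, eq2, max2⟩ := ih (l + 1) r _ (by omega) (by omega) hr
          refine ⟨?_, ?_, ?_⟩
          · exact le_trans (by split <;> omega) le2
          · rcases eq2 with h' | ⟨⟨a, b, h1, h2, h3, h4⟩, hm⟩
            · rw [h']
              split_ifs with hgt
              · exact Or.inr ⟨⟨l, r, le_refl _, hlr, le_refl _, rfl⟩, hsm⟩
              · exact Or.inl rfl
            · exact Or.inr ⟨⟨a, b, by omega, h2, h3, h4⟩, hm⟩
          · rintro s ⟨a, b, h1, h2, h3, rfl⟩ hm
            by_cases ha : l + 1 ≤ a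
            · exact max2 _ ⟨a, b, ha, h2, h3, rfl⟩ hm
            · -- a = l: the candidate is at most x + ys[l] + ys[r]
              have haeq : a = l := by omega
              subst haeq
              have hgb : PySem.List.pyGetD ys b 0 = ys.getD b.toNat 0 := by
                rw [PySem.List.pyGetD_eq_getElem ys 0 (by omega) (by omega),
                  List.getD_eq_getElem ys 0 (by omega)]
              have hbr : ys.getD b.toNat 0 ≤ ys.getD r.toNat 0 :=
                hmono b.toNat r.toNat (by omega) (by omega)
              have hbest : x + PySem.List.pyGetD ys a 0 + PySem.List.pyGetD ys r 0 ≤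
                  (if x + PySem.List.pyGetD ys a 0 + PySem.List.pyGetD ys r 0 > best then
                    x + PySem.List.pyGetD ys a 0 + PySem.List.pyGetD ys r 0 else best) := by
                split <;> omega
              have := le_trans hbest le2
              rw [hgb] at *
              omega
        · rw [if_neg hsm]
          obtain ⟨le2, eq2, max2⟩ := ih l (r - 1) best (by omega) hl (by omega)
          refine ⟨le2, ?_, ?_⟩
          · rcases eq2 with h' | ⟨⟨a, b, h1, h2, h3, h4⟩, hm⟩
            · exact Or.inl h'
            · exact Or.inr ⟨⟨a, b, h1, h2, by omega, h4⟩, hm⟩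
          · rintro s ⟨a, b, h1, h2, h3, rfl⟩ hm
            by_cases hb : b ≤ r - 1
            · exact max2 _ ⟨a, b, h1, h2, hb, rfl⟩ hm
            · -- b = r: the candidate is at least x + ys[l] + ys[r] > m, contradiction
              have hbeq : b = r := by omega
              subst hbeq
              have hga : PySem.List.pyGetD ys a 0 = ys.getD a.toNat 0 := by
                rw [PySem.List.pyGetD_eq_getElem ys 0 (by omega) (by omega),
                  List.getD_eq_getElem ys 0 (by omega)]
              have hla : ys.getD l.toNat 0 ≤ ys.getD a.toNat 0 :=
                hmono l.toNat a.toNat (by omega) (by omega)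
              rw [hga] at hm
              rw [hgl] at hsm
              omega
      · rw [if_neg hlr]
        exact ⟨le_refl _, Or.inl rfl, by rintro s ⟨a, b, h1, h2, h3, _⟩ _; omega⟩
  exact fun l r best hl hr => key (r - l).toNat l r best (le_refl _) hl hr

lemma sortedPrefix_mono (n : Int) (cards : List Int) :
    ∀ p q : Nat, ∀ _ : q < (pvSortedPrefix n cards).length, p ≤ q →
      (pvSortedPrefix n cards).getD p 0 ≤ (pvSortedPrefix n cards).getD q 0 := by
  unfold pvSortedPrefix
  split
  · intro p q hq hpq
    rw [List.getD_eq_getElem _ 0 (by omega), List.getD_eq_getElem _ 0 hq]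
    exact PySem.List.sorted_id_getElem_mono _ hpq hq
  · intro p q hq _
    simp at hq

lemma B_isB (n m : Int) (cards : List Int) :
    isB m (fun s => ∃ i j k : Nat, i < j ∧ j < k ∧ k < (pvSortedPrefix n cards).length ∧
        s = (pvSortedPrefix n cards).getD i 0 + (pvSortedPrefix n cards).getD j 0 +
          (pvSortedPrefix n cards).getD k 0)
      0 (blackjack_alt n m cards) := by
  unfold blackjack_alt
  have hmono := sortedPrefix_mono n cards
  have h := isB_fold (m := m)
    (PySem.List.pyRange 0 (((pvSortedPrefix n cards).length : Int) - 2) 1)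
    (fun i s => ∃ a b : Int, i + 1 ≤ a ∧ a < b ∧ b ≤ ((pvSortedPrefix n cards).length : Int) - 1 ∧
      s = PySem.List.pyGetD (pvSortedPrefix n cards) i 0 +
        PySem.List.pyGetD (pvSortedPrefix n cards) a 0 +
        PySem.List.pyGetD (pvSortedPrefix n cards) b 0) _
    (fun i hi b => by
      have h0i : 0 ≤ i := (PySem.List.mem_pyRange_one.mp hi).1
      have := twoPtr_isB m (pvSortedPrefix n cards)
        (PySem.List.pyGetD (pvSortedPrefix n cards) i 0) hmono
        (i + 1) (((pvSortedPrefix n cards).length : Int) - 1) b (by omega) (by omega)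
      refine isB_iff (fun s => ?_) this
      constructor
      · rintro ⟨a, b', h1, h2, h3, rfl⟩; exact ⟨a, b', h1, h2, h3, by ring⟩
      · rintro ⟨a, b', h1, h2, h3, rfl⟩; exact ⟨a, b', h1, h2, h3, by ring⟩) 0
  refine isB_iff (fun s => ?_) h
  simp only [PySem.List.mem_pyRange_one]
  constructor
  · rintro ⟨i, ⟨h0, hi⟩, a, b, h1, h2, h3, rfl⟩
    have hgi : PySem.List.pyGetD (pvSortedPrefix n cards) i 0 =
        (pvSortedPrefix n cards).getD i.toNat 0 := by
      rw [PySem.List.pyGetD_eq_getElem _ 0 h0 (by omega),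
        List.getD_eq_getElem _ 0 (by omega)]
    have hga : PySem.List.pyGetD (pvSortedPrefix n cards) a 0 =
        (pvSortedPrefix n cards).getD a.toNat 0 := by
      rw [PySem.List.pyGetD_eq_getElem _ 0 (by omega) (by omega),
        List.getD_eq_getElem _ 0 (by omega)]
    have hgb : PySem.List.pyGetD (pvSortedPrefix n cards) b 0 =
        (pvSortedPrefix n cards).getD b.toNat 0 := by
      rw [PySem.List.pyGetD_eq_getElem _ 0 (by omega) (by omega),
        List.getD_eq_getElem _ 0 (by omega)]
    exact ⟨i.toNat, a.toNat, b.toNat, by omega, by omega, by omega,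
      by rw [hgi, hga, hgb]⟩
  · rintro ⟨i, j, k, h1, h2, h3, rfl⟩
    refine ⟨(i : Int), ⟨by omega, by omega⟩, (j : Int), (k : Int), by omega, by omega, by omega, ?_⟩
    rw [PySem.List.pyGetD_eq_getElem _ 0 (by omega : (0:Int) ≤ (i:Int)) (by omega),
      PySem.List.pyGetD_eq_getElem _ 0 (by omega : (0:Int) ≤ (j:Int)) (by omega),
      PySem.List.pyGetD_eq_getElem _ 0 (by omega : (0:Int) ≤ (k:Int)) (by omega)]
    simp only [Int.toNat_natCast]
    rw [List.getD_eq_getElem _ 0 (by omega), List.getD_eq_getElem _ 0 (by omega),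
      List.getD_eq_getElem _ 0 h3]

-- A's candidate set over Int indices below n equals the 3-sublist sums of the first n cards
lemma A_set_iff (n : Int) (cards : List Int) (hn : n ≤ (cards.length : Int)) (s : Int) :
    (∃ i j k : Int, 0 ≤ i ∧ i < j ∧ j < k ∧ k < n ∧
      s = PySem.List.pyGetD cards i 0 + PySem.List.pyGetD cards j 0 +
        PySem.List.pyGetD cards k 0)
    ↔ tripSum (cards.take n.toNat) s := by
  rw [tripSum_iff_idx]
  have hlen : (cards.take n.toNat).length = min n.toNat cards.length := List.length_take
  constructor
  · rintro ⟨i, j, k, h0, h1, h2, h3, rfl⟩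
    refine ⟨i.toNat, j.toNat, k.toNat, by omega, by omega, by omega, ?_⟩
    rw [PySem.List.pyGetD_eq_getElem cards 0 h0 (by omega),
      PySem.List.pyGetD_eq_getElem cards 0 (by omega) (by omega),
      PySem.List.pyGetD_eq_getElem cards 0 (by omega) (by omega),
      List.getD_eq_getElem _ 0 (by omega), List.getD_eq_getElem _ 0 (by omega),
      List.getD_eq_getElem _ 0 (by omega)]
    simp [List.getElem_take]
  · rintro ⟨i, j, k, h1, h2, h3, rfl⟩
    refine ⟨(i : Int), (j : Int), (k : Int), by omega, by omega, by omega, by omega, ?_⟩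
    rw [PySem.List.pyGetD_eq_getElem cards 0 (by omega) (by omega),
      PySem.List.pyGetD_eq_getElem cards 0 (by omega) (by omega),
      PySem.List.pyGetD_eq_getElem cards 0 (by omega) (by omega),
      List.getD_eq_getElem _ 0 (by omega), List.getD_eq_getElem _ 0 (by omega),
      List.getD_eq_getElem _ 0 h3]
    simp only [Int.toNat_natCast]
    simp [List.getElem_take]

-- ===== VERDICT (by name: the statement is the Claim_ definition above) =====
theorem blackjack_spec : Claim_equal_blackjack := by
  intro n m cards _ hpre
  unfold Spec_blackjack
  by_cases h3 : n < 3
  · -- fewer than three cards are in play: both programs return 0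
    have hA : blackjack n m cards = 0 := by
      unfold blackjack
      rw [PySem.List.pyRange_one_eq_nil (by omega)]
      rfl
    have hlen : (pvSortedPrefix n cards).length ≤ 2 := by
      unfold pvSortedPrefix
      split
      · rw [PySem.List.length_sorted, PySem.List.slice_to cards (by omega : (0 : Int) ≤ n),
          List.length_take]
        omega
      · simp
    have hB : blackjack_alt n m cards = 0 := by
      unfold blackjack_alt
      rw [PySem.List.pyRange_one_eq_nil (by omega)]
      rfl
    rw [hA, hB]
  · have hn : n ≤ (cards.length : Int) := by
      unfold Pre_blackjack at hpre; omega
    have hperm : (cards.take n.toNat).Perm (pvSortedPrefix n cards) := by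
      unfold pvSortedPrefix
      rw [if_pos (by omega : n > 0), PySem.List.slice_to cards (by omega : (0 : Int) ≤ n)]
      exact (PySem.List.sorted_perm _ _ _).symm
    refine isB_unique (m := m) (S := tripSum (pvSortedPrefix n cards)) ?_ ?_
    · refine isB_iff (fun s => ?_) (A_isB n m cards)
      rw [A_set_iff n cards hn s]
      exact tripSum_perm hperm s
    · refine isB_iff (fun s => ?_) (B_isB n m cards)
      exact (tripSum_iff_idx _ s).symm
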